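-- pv_equiv track=rewrite | github.com/gafur55/Computational-Biology | hw2/hw2.py | motif_finding
-- ===== SOURCE A (Python) =====
-- def motif_finding(dna, k, d):
--     patterns = set()
--     all_neighbors = set()
--     first_dna = dna[0]
--
--     for string in dna:
--         for i in range(len(first_dna)-k+1):
--             new_neighbors = neighbors(string[i:i+k], d)
--             all_neighbors |= new_neighbors
--
--     for neighbor in all_neighbors:
--         flag = True
--         for i in range(0, len(dna)):
--             if len(approx_kmers_find(neighbor, dna[i], d)) == 0:
--                 flag = False
--         if flag:
--             patterns.add(neighbor)
--
--     return patterns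
--
-- def approx_kmers_find(pattern, text, d):
--     result = []
--     for i in range(len(text)-len(pattern)+1):
--         if hamming_dist(text[i:i+len(pattern)], pattern) <= d:
--             result.append(i)
--     return result
--
-- def neighbors(pattern, d):
--     if d == 0:
--         return pattern
--     if len(pattern) == 1:
--         return ('A','C','G','T')
--
--     neighborhood = []
--     suffix_neighbors = neighbors(pattern[1:len(pattern)], d)
--
--     for text in suffix_neighbors:
--         if hamming_dist(pattern[1:len(pattern)], text) < d:
--             for nucleotide in ['A', 'C', 'G', 'T']:
--                 neighborhood.append(nucleotide+text)
--         else: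
--             neighborhood.append(pattern[0]+text)
--
--     return set(neighborhood)
--
-- def hamming_dist(str1, str2):
--     hamming_distance = 0
--     for i in range(len(str1)):
--         if str1[i] != str2[i]:
--             hamming_distance += 1
--     return hamming_distance
-- ===== SOURCE B (Python) =====
-- # Different algorithm: iterative right-to-left DP neighborhood generation that tracks each
-- # candidate's Hamming distance in a dict (no per-candidate hamming_dist rescans), a memo so each
-- # distinct window's neighborhood is generated once, and string-major pruning of the surviving
-- # candidates with an early-exit existence test instead of building full occurrence lists.
--
-- def neighborhood(pattern, d):
--     frontier = ('A', 'C', 'G', 'T')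
--     dist = {n: (0 if n == pattern[-1] else 1) for n in 'ACGT'}
--     for c in reversed(pattern[:-1]):
--         nf, nd = set(), {}
--         for t in frontier:
--             h = dist[t]
--             if h < d:
--                 for n in 'ACGT':
--                     q = n + t
--                     nf.add(q)
--                     nd.setdefault(q, h + (n != c))
--             else:
--                 nf.add(c + t)
--                 nd.setdefault(c + t, h)
--         frontier, dist = nf, nd
--     return frontier
--
-- def occurs_within(pattern, text, d):
--     m = len(pattern)
--     for j in range(len(text) - m + 1):
--         if sum(a != b for a, b in zip(text[j:j + m], pattern)) <= d:
--             return True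
--     return False
--
-- def motif_finding(dna, k, d):
--     first = dna[0]
--     memo = {}
--     cands = set()
--     for s in dna:
--         for i in range(len(first) - k + 1):
--             w = s[i:i + k]
--             if w not in memo:
--                 memo[w] = neighborhood(w, d)
--             cands |= memo[w]
--     survivors = [c for c in cands]
--     for s in dna:
--         survivors = [c for c in survivors if occurs_within(c, s, d)]
--     return {c for c in survivors}
-- ===== Notes on version B (the rewrite author's own statement) =====
-- stated objective: alternative
-- what changed: Replaces A's recursive neighborhood generator (which recomputes a Hamming distance for every candidate at every recursion level) by an iterative right-to-left DP that carries each candidate's distance in a dict, generates each distinct window's neighborhood only once via a memo, and prunes candidates string-major with an early-exit existence test instead of building full occurrence-index lists.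
import Mathlib
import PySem

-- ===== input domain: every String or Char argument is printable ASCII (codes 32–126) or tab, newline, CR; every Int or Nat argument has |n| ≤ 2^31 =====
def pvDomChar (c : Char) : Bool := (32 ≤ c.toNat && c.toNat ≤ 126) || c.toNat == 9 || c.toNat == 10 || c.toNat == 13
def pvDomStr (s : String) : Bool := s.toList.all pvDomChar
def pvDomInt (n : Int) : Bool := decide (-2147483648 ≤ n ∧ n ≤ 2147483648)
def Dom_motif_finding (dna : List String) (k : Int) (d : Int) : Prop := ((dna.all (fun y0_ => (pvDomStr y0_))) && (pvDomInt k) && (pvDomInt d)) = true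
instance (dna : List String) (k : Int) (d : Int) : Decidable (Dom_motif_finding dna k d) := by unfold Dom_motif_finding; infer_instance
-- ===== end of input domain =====

-- B replaces A's recursive neighborhood generator (which recomputes a Hamming distance for every
-- candidate at every recursion level) by an iterative right-to-left DP that carries each
-- candidate's distance in a dict, generates each DISTINCT window's neighborhood once (a memo),
-- and prunes candidates string-major with an early-exit existence test.

-- ===== PORT A =====

-- hamming_dist: exact whenever len str1 ≤ len str2 — the only case either program reaches
-- (Python raises IndexError when str1 is longer; no call site produces that).
def pvHam : List Char → List Char → Int
  | a :: as, b :: bs => (if a = b then 0 else 1) + pvHam as bs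
  | _, _ => 0

-- neighbors: returns the ITERATION of what Python returns (str → its chars, tuple/set → elements).
-- On the empty pattern with d ≠ 0 Python recurses forever; that input is excluded by Pre_ ([] here).
def pvNeighbors (p : List Char) (d : Int) : List (List Char) :=
  if d = 0 then p.map (fun c => [c])
  else if p.length = 1 then [['A'], ['C'], ['G'], ['T']]
  else
    match p with
    | [] => []
    | c :: rest =>
      PySem.Set.ofList ((pvNeighbors rest d).foldl (fun acc t =>
        if pvHam rest t < d then acc ++ [('A' : Char) :: t, 'C' :: t, 'G' :: t, 'T' :: t]
        else acc ++ [c :: t]) [])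

def pvApprox (pattern text : List Char) (d : Int) : List Int :=
  (PySem.List.pyRange 0 ((text.length : Int) - (pattern.length : Int) + 1) 1).foldl
    (fun r i =>
      if pvHam (PySem.List.slice text (some i) (some (i + (pattern.length : Int)))) pattern ≤ d
      then r ++ [i] else r) []

def motif_finding (dna : List String) (k : Int) (d : Int) : List String :=
  let dnaC := dna.map String.toList
  let first := dnaC.headD []
  let allN : PySem.Set (List Char) :=
    dnaC.foldl (fun acc s =>
      (PySem.List.pyRange 0 ((first.length : Int) - k + 1) 1).foldl (fun acc2 i =>
        PySem.Set.union acc2 (pvNeighbors (PySem.List.slice s (some i) (some (i + k))) d)) acc)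
      PySem.Set.empty
  let patterns : PySem.Set (List Char) :=
    allN.foldl (fun pats nb =>
      let flag := dnaC.foldl (fun f s => if (pvApprox nb s d).length == 0 then false else f) true
      if flag then PySem.Set.add pats nb else pats) PySem.Set.empty
  patterns.map String.ofList

-- ===== PORT B =====

def pvNucs : List Char := ['A', 'C', 'G', 'T']

-- one level of Source B's neighborhood DP: extend every frontier candidate by the character c,
-- tracking the new distance in the dict (state = (frontier, dist))
def pvStepP (d : Int) (c : Char)
    (st : PySem.Set (List Char) × PySem.Dict (List Char) Int) :
    PySem.Set (List Char) × PySem.Dict (List Char) Int :=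
  st.1.foldl (fun nx t =>
    -- h = dist[t]: t is always a key of dist (frontier and dist carry the same keys), so the
    -- total getD is exact here (Python's dist[t] never raises)
    let h := st.2.getD t 0
    if h < d then
      pvNucs.foldl (fun nx2 n =>
        (PySem.Set.add nx2.1 (n :: t),
         nx2.2.setdefault (n :: t) (h + (if n ≠ c then 1 else 0)))) nx
    else (PySem.Set.add nx.1 (c :: t), nx.2.setdefault (c :: t) h))
    (PySem.Set.empty, PySem.Dict.empty)

-- Source B's neighborhood: (frontier, dist) built right-to-left over the pattern; the initial
-- frontier is the 4-nucleotide tuple, iterated as the list it is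
def pvLevelP (p : List Char) (d : Int) :
    PySem.Set (List Char) × PySem.Dict (List Char) Int :=
  let last := PySem.List.pyGetD p (-1) 'A'
  let frontier0 : List (List Char) := [['A'], ['C'], ['G'], ['T']]
  let dist0 := pvNucs.foldl (fun dd n => dd.insert [n] (if n = last then 0 else 1))
    PySem.Dict.empty
  ((PySem.List.slice p none (some (-1))).reverse).foldl
    (fun st c => pvStepP d c st) (frontier0, dist0)

-- Source B's occurs_within: early-exit existence test (ported as List.any)
def pvOccurs (c : List Char) (s : List Char) (d : Int) : Bool :=
  (PySem.List.pyRange 0 ((s.length : Int) - (c.length : Int) + 1) 1).any (fun j =>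
    decide ((((PySem.List.slice s (some j) (some (j + (c.length : Int)))).zip c).map
      (fun ab => if ab.1 ≠ ab.2 then (1 : Int) else 0)).sum ≤ d))

def motif_finding_alt (dna : List String) (k : Int) (d : Int) : List String :=
  let dnaC := dna.map String.toList
  let first := dnaC.headD []
  -- candidate collection with a memo: each distinct window's neighborhood is generated once
  let st :=
    dnaC.foldl (fun (st : PySem.Dict (List Char) (List (List Char)) × PySem.Set (List Char)) s =>
      (PySem.List.pyRange 0 ((first.length : Int) - k + 1) 1).foldl (fun st2 i =>
        let w := PySem.List.slice s (some i) (some (i + k))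
        if st2.1.contains w then (st2.1, PySem.Set.update st2.2 (st2.1.getD w []))
        else (st2.1.insert w (pvLevelP w d).1,
              PySem.Set.update st2.2 (pvLevelP w d).1)) st)
      (PySem.Dict.empty, PySem.Set.empty)
  let survivors := dnaC.foldl (fun cs s => cs.filter (fun c => pvOccurs c s d)) st.2
  survivors.map String.ofList

-- ===== PRECONDITION & SPEC =====
-- Pre_ is exactly where the Python A returns normally: it excludes only crashes — dna[0] IndexError on [],
-- TypeError from `set |= str/tuple` (whenever d == 0 or some window of length ≤ 1 arises, i.e. k < 2 or a
-- string shorter than len(dna[0]) - k + 2 while len(dna[0]) ≥ k), and unbounded recursion on an empty window.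
def Pre_motif_finding (dna : List String) (k : Int) (d : Int) : Prop :=
  dna ≠ [] ∧
    (((dna.headD "").toList.length : Int) < k ∨
      (2 ≤ k ∧ d ≠ 0 ∧
        ∀ s ∈ dna, ((dna.headD "").toList.length : Int) - k + 2 ≤ (s.toList.length : Int)))
instance (dna : List String) (k : Int) (d : Int) : Decidable (Pre_motif_finding dna k d) := by
  unfold Pre_motif_finding; infer_instance

def pvWitness_motif_finding : List String × Int × Int := (["ACGTA", "CCGTT"], 3, 1)

def Spec_motif_finding (dna : List String) (k : Int) (d : Int) (out : List String) : Prop := out = motif_finding_alt dna k d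
instance (dna : List String) (k : Int) (d : Int) (out : List String) : Decidable (Spec_motif_finding dna k d out) := by unfold Spec_motif_finding; infer_instance

-- ===== CLAIM (what is proved, stated in full; the proofs are below) =====
def Claim_equal_motif_finding : Prop := ∀ (dna : List String) (k : Int) (d : Int), Dom_motif_finding dna k d → Pre_motif_finding dna k d → Spec_motif_finding dna k d (motif_finding dna k d)

-- ===== LEMMAS AND PROOFS =====

-- hamming_dist is the 0/1 sum over the zipped pair (Source B's sum(a != b for a, b in zip(...)))
theorem pv_ham_eq_zip_sum (a b : List Char) :
    pvHam a b = ((a.zip b).map (fun ab => if ab.1 ≠ ab.2 then (1 : Int) else 0)).sum := by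
  induction a generalizing b with
  | nil => simp [pvHam]
  | cons x xs ih =>
    cases b with
    | nil => simp [pvHam]
    | cons y ys => simp [pvHam, ih, ite_not]

theorem pv_ham_cons (c n : Char) (rest t : List Char) :
    pvHam rest t + (if n ≠ c then (1 : Int) else 0) = pvHam (c :: rest) (n :: t) := by
  show _ = (if c = n then (0:Int) else 1) + pvHam rest t
  by_cases h : c = n
  · simp [h]
  · simp [h, Ne, eq_comm]
    omega

-- unrolling Source B's right-to-left loop one pattern character at a time
theorem pv_levelP_cons (c : Char) (rest : List Char) (d : Int) (h : rest ≠ []) :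
    pvLevelP (c :: rest) d = pvStepP d c (pvLevelP rest d) := by
  unfold pvLevelP
  rw [PySem.List.pyGetD_neg_one _ _ (by simp), PySem.List.pyGetD_neg_one _ _ h,
    List.getLast_cons h, PySem.List.slice_to_neg_one, PySem.List.slice_to_neg_one]
  cases rest with
  | nil => exact absurd rfl h
  | cons y ys =>
    rw [List.dropLast_cons₂, List.reverse_cons, List.foldl_append]
    simp

-- folding setdefault over keys paired with a fixed value function F is a Set.update of the keys
theorem pv_foldl_setdefault (F : List Char → Int) (qs : List (List Char)) (s : List (List Char)) :
    (qs.foldl (fun dct q => PySem.Dict.setdefault dct q (F q))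
        (PySem.Dict.mk (s.map (fun q => (q, F q))))).items
      = (PySem.Set.update s qs).map (fun q => (q, F q)) := by
  induction qs generalizing s with
  | nil => simp [PySem.Set.update]
  | cons q qs ih =>
    have hkeys : (PySem.Dict.mk (s.map (fun q => (q, F q)))).keys = s := by
      simp only [PySem.Dict.keys, List.map_map, Function.comp_def]; exact List.map_id' s
    by_cases hq : q ∈ s
    · have hc : (PySem.Dict.mk (s.map (fun q => (q, F q)))).contains q = true := by
        rw [PySem.Dict.contains_iff_mem_keys, hkeys]; exact hq
      rw [List.foldl_cons, PySem.Dict.setdefault_of_contains _ _ hc,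
        PySem.Set.update_cons, PySem.Set.add_of_mem hq, ih]
    · have hc : (PySem.Dict.mk (s.map (fun q => (q, F q)))).contains q = false := by
        rw [Bool.eq_false_iff, Ne, PySem.Dict.contains_iff_mem_keys, hkeys]; exact hq
      rw [List.foldl_cons, PySem.Dict.setdefault_of_not_contains _ _ hc,
        PySem.Set.update_cons, PySem.Set.add_of_not_mem hq]
      have : (PySem.Dict.mk (s.map (fun q => (q, F q)))).insert q (F q)
          = PySem.Dict.mk ((s ++ [q]).map (fun q => (q, F q))) := by
        apply PySem.Dict.ext
        rw [PySem.Dict.items_insert_of_not_contains _ _ hc]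
        simp
      rw [this, ih]

theorem pv_neighbors_cons₂ (c y : Char) (ys : List Char) (d : Int) (hd : d ≠ 0) :
    pvNeighbors (c :: y :: ys) d
      = PySem.Set.ofList ((pvNeighbors (y :: ys) d).flatMap (fun t =>
          if pvHam (y :: ys) t < d then [('A' : Char) :: t, 'C' :: t, 'G' :: t, 'T' :: t]
          else [c :: t])) := by
  rw [pvNeighbors, if_neg hd, if_neg (by simp)]
  rw [PySem.List.foldl_congr_mem _ _
    (fun acc t => acc ++ (if pvHam (y :: ys) t < d
      then [('A' : Char) :: t, 'C' :: t, 'G' :: t, 'T' :: t] else [c :: t])) _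
    (fun acc t _ => by dsimp only; split_ifs <;> rfl),
    PySem.List.foldl_append_eq_flatMap, List.nil_append]

theorem pv_neighbors_nodup (p : List Char) (d : Int) (hd : d ≠ 0) (hp : p ≠ []) :
    (pvNeighbors p d).Nodup := by
  cases p with
  | nil => exact absurd rfl hp
  | cons c rest =>
    cases rest with
    | nil => rw [pvNeighbors, if_neg hd, if_pos (by simp)]; decide
    | cons y ys => rw [pv_neighbors_cons₂ c y ys d hd]; exact PySem.Set.nodup_ofList _

-- one DP step, on the invariant state: frontier = A's neighborhood list of the suffix,
-- dist = that list paired with the true distances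
theorem pv_stepP_eq (c : Char) (rest : List Char) (d : Int) (hd : d ≠ 0) (hr : rest ≠ []) :
    pvStepP d c (pvNeighbors rest d,
        PySem.Dict.mk ((pvNeighbors rest d).map (fun t => (t, pvHam rest t))))
      = (pvNeighbors (c :: rest) d,
         PySem.Dict.mk ((pvNeighbors (c :: rest) d).map (fun t => (t, pvHam (c :: rest) t)))) := by
  have hkeys : (PySem.Dict.mk ((pvNeighbors rest d).map
      (fun t => (t, pvHam rest t)))).keys = pvNeighbors rest d := by
    simp only [PySem.Dict.keys, List.map_map, Function.comp_def]; exact List.map_id' _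
  have hnd : (PySem.Dict.mk ((pvNeighbors rest d).map
      (fun t => (t, pvHam rest t)))).keys.Nodup := by
    rw [hkeys]; exact pv_neighbors_nodup rest d hd hr
  have hget : ∀ t ∈ pvNeighbors rest d,
      (PySem.Dict.mk ((pvNeighbors rest d).map (fun t => (t, pvHam rest t)))).getD t 0
        = pvHam rest t := by
    intro t ht
    have hmem : (t, pvHam rest t)
        ∈ (pvNeighbors rest d).map (fun t => (t, pvHam rest t)) :=
      List.mem_map.mpr ⟨t, ht, rfl⟩
    exact PySem.Dict.getD_of_mem_items _ hmem hnd 0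
  unfold pvStepP
  rw [show (pvNeighbors rest d,
        PySem.Dict.mk ((pvNeighbors rest d).map (fun t => (t, pvHam rest t)))).1
      = pvNeighbors rest d from rfl,
    PySem.List.foldl_congr_mem _ _
      (fun (nx : PySem.Set (List Char) × PySem.Dict (List Char) Int) t =>
        (if pvHam rest t < d
          then [('A' : Char) :: t, 'C' :: t, 'G' :: t, 'T' :: t] else [c :: t]).foldl
          (fun st q => (PySem.Set.add st.1 q, st.2.setdefault q (pvHam (c :: rest) q))) nx) _
      (fun acc t ht => by
        dsimp only
        rw [hget t ht]
        split_ifs with hlt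
        · simp only [pvNucs, List.foldl_cons, List.foldl_nil]
          rw [pv_ham_cons c 'A' rest t, pv_ham_cons c 'C' rest t,
            pv_ham_cons c 'G' rest t, pv_ham_cons c 'T' rest t]
        · have h0 : pvHam (c :: rest) (c :: t) = pvHam rest t := by simp [pvHam]
          rw [List.foldl_cons, List.foldl_nil, h0]),
    ← List.foldl_flatMap,
    PySem.List.foldl_prod_mk (f := fun s q => PySem.Set.add s q)
      (g := fun dd q => PySem.Dict.setdefault dd q (pvHam (c :: rest) q))]
  cases rest with
  | nil => exact absurd rfl hr
  | cons y ys =>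
    rw [pv_neighbors_cons₂ c y ys d hd]
    refine Prod.ext rfl ?_
    show _ = PySem.Dict.mk _
    apply PySem.Dict.ext
    have h := pv_foldl_setdefault (fun q => pvHam (c :: y :: ys) q)
      ((pvNeighbors (y :: ys) d).flatMap (fun t =>
        if pvHam (y :: ys) t < d then [('A' : Char) :: t, 'C' :: t, 'G' :: t, 'T' :: t]
        else [c :: t])) []
    simp only [List.map_nil] at h
    rw [show (PySem.Dict.empty : PySem.Dict (List Char) Int) = PySem.Dict.mk [] from rfl, h,
      PySem.Set.update_nil_left]

-- the DP level invariant: frontier is A's neighborhood list, dist pairs it with true distances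
theorem pv_levelP_eq (p : List Char) (d : Int) (hd : d ≠ 0) (hp : p ≠ []) :
    pvLevelP p d = (pvNeighbors p d,
      PySem.Dict.mk ((pvNeighbors p d).map (fun t => (t, pvHam p t)))) := by
  induction p with
  | nil => exact absurd rfl hp
  | cons c rest ih =>
    cases rest with
    | nil =>
      rw [show pvNeighbors [c] d = [['A'], ['C'], ['G'], ['T']] from by
        rw [pvNeighbors, if_neg hd, if_pos (by simp)]]
      unfold pvLevelP
      rw [PySem.List.pyGetD_neg_one _ _ (by simp)]
      simp only [List.getLast_singleton, PySem.List.slice_to_neg_one]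
      refine Prod.ext rfl ?_
      apply PySem.Dict.ext
      show (PySem.Dict.mk _).items = _
      simp [PySem.Dict.insert, PySem.Dict.empty, PySem.Dict.contains, pvHam]
      refine ⟨?_, ?_, ?_, ?_⟩ <;>
        · by_cases h : c ∈ pvNucs
          · simp_all [pvNucs]
            rcases h with h | h | h | h <;> simp [h]
          · simp_all [pvNucs]
            simp [eq_comm]
            tauto
    | cons y ys =>
      have hr' : y :: ys ≠ [] := by simp
      rw [pv_levelP_cons c (y :: ys) d hr', ih hr', pv_stepP_eq c (y :: ys) d hd hr']

-- a loop unioning g x into a set is one update by the concatenated stream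
theorem pv_foldl_update {α γ : Type} [BEq α] (l : List γ) (g : γ → List α) (s : PySem.Set α) :
    l.foldl (fun a x => PySem.Set.update a (g x)) s = PySem.Set.update s (l.flatMap g) := by
  induction l generalizing s with
  | nil => rfl
  | cons x rest ih =>
      simp only [List.foldl_cons, List.flatMap_cons, PySem.Set.update_append, ih]

-- the memo changes nothing observable: the candidate component of Source B's memoised collection
-- loop is the plain union loop
theorem pv_memo_fold (F : List Char → List (List Char)) (ws : List (List Char))
    (st : PySem.Dict (List Char) (List (List Char)) × PySem.Set (List Char))
    (hm : ∀ w v, st.1.get? w = some v → v = F w) :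
    (ws.foldl (fun st2 w =>
        if st2.1.contains w then (st2.1, PySem.Set.update st2.2 (st2.1.getD w []))
        else (st2.1.insert w (F w), PySem.Set.update st2.2 (F w))) st).2
      = ws.foldl (fun c w => PySem.Set.update c (F w)) st.2 := by
  induction ws generalizing st with
  | nil => rfl
  | cons w ws ih =>
    simp only [List.foldl_cons]
    by_cases hc : st.1.contains w
    · rw [if_pos hc]
      have hgd : st.1.getD w [] = F w := by
        rcases Option.isSome_iff_exists.mp
          ((PySem.Dict.contains_eq_isSome_get? st.1 w) ▸ hc) with ⟨v, hv⟩
        rw [PySem.Dict.getD_of_get?_eq_some _ _ hv]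
        exact hm w v hv
      rw [hgd]
      exact ih (st.1, PySem.Set.update st.2 (F w)) hm
    · rw [if_neg hc]
      refine ih _ (fun w' v hv => ?_)
      by_cases hw : w' = w
      · subst hw
        rw [show (st.1.insert w' (F w'), PySem.Set.update st.2 (F w')).1
            = st.1.insert w' (F w') from rfl, PySem.Dict.get?_insert_self] at hv
        exact (Option.some_inj.mp hv).symm
      · rw [show (st.1.insert w (F w), PySem.Set.update st.2 (F w)).1
            = st.1.insert w (F w) from rfl, PySem.Dict.get?_insert_of_ne _ _ hw] at hv
        exact hm w' v hv

-- successive filters by each string equal one filter by the conjunction over all strings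
theorem pv_foldl_filter {α γ : Type} (L : List γ) (p : γ → α → Bool) (cs : List α) :
    L.foldl (fun cs s => cs.filter (p s)) cs = cs.filter (fun c => L.all (fun s => p s c)) := by
  induction L generalizing cs with
  | nil => simp
  | cons x rest ih =>
      simp only [List.foldl_cons, ih, List.filter_filter, List.all_cons]
      exact List.filter_congr (fun a _ => by rw [Bool.and_comm])

-- folding conditional Set.add over a Nodup list is a filter
theorem pv_foldl_add_filter {α : Type} [BEq α] [LawfulBEq α]
    (s : List α) (flag : α → Bool) (acc : List α)
    (hd : s.Nodup) (hdisj : ∀ x ∈ s, x ∉ acc) :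
    s.foldl (fun pats nb => if flag nb then PySem.Set.add pats nb else pats) acc
      = acc ++ s.filter flag := by
  induction s generalizing acc with
  | nil => simp
  | cons x xs ih =>
    simp only [List.foldl_cons, List.filter_cons]
    rcases List.nodup_cons.mp hd with ⟨hx, hxs⟩
    by_cases hf : flag x
    · rw [if_pos hf, if_pos hf, PySem.Set.add_of_not_mem (hdisj x (by simp)),
        ih _ hxs (fun z hz => by
          simp only [List.mem_append, List.mem_singleton]
          rintro (h1 | rfl)
          · exact hdisj z (by simp [hz]) h1
          · exact hx hz)]
      simp
    · rw [if_neg (by simpa using hf), if_neg (by simpa using hf),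
        ih _ hxs (fun z hz => hdisj z (by simp [hz]))]

-- pvApprox as an explicit filter of the index range
theorem pv_approx_eq_filter (nb s : List Char) (d : Int) :
    pvApprox nb s d =
      (PySem.List.pyRange 0 ((s.length : Int) - (nb.length : Int) + 1) 1).filter
        (fun i => decide (pvHam (PySem.List.slice s (some i) (some (i + (nb.length : Int)))) nb ≤ d)) := by
  simp [pvApprox, PySem.List.foldl_append_ite_eq_filter]

theorem pv_filter_len_beq_zero {α : Type} (l : List α) (p : α → Bool) :
    ((l.filter p).length == 0) = !l.any p := by
  cases h : l.any p <;>
    simp_all [List.any_eq_true, List.filter_eq_nil_iff, List.length_eq_zero_iff]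

theorem pv_main_eq (dna : List String) (k d : Int) (hpre : Pre_motif_finding dna k d) :
    motif_finding dna k d = motif_finding_alt dna k d := by
  obtain ⟨hne, hcase⟩ := hpre
  simp only [motif_finding, motif_finding_alt]
  set dnaC := dna.map String.toList with hdC
  set R := PySem.List.pyRange 0 ((((dnaC.headD []).length : Int)) - k + 1) 1 with hRdef
  set W := dnaC.flatMap (fun s =>
      R.map (fun i => PySem.List.slice s (some i) (some (i + k)))) with hW
  -- every window comes from a nonempty range, so the first string is at least k long and d ≠ 0
  have hbranch : ∀ w ∈ W, d ≠ 0 ∧ w ≠ [] := by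
    intro w hwmem
    rw [hW, List.mem_flatMap] at hwmem
    obtain ⟨s, hs, hw⟩ := hwmem
    rw [List.mem_map] at hw
    obtain ⟨i, hi, rfl⟩ := hw
    rw [hRdef, PySem.List.mem_pyRange_one] at hi
    obtain ⟨s0, tl, rfl⟩ : ∃ s0 tl, dna = s0 :: tl := by
      cases dna with
      | nil => exact absurd rfl hne
      | cons a b => exact ⟨a, b, rfl⟩
    have hfirst : dnaC.headD [] = s0.toList := by rw [hdC]; rfl
    rw [hfirst] at hi
    have hk : ¬ ((s0.toList.length : Int) < k) := by omega
    rcases hcase with h1 | ⟨hk2, hd, hlen⟩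
    · exact absurd h1 hk
    · refine ⟨hd, ?_⟩
      rw [hdC, List.mem_map] at hs
      obtain ⟨x, hx, rfl⟩ := hs
      have hxl : (s0.toList.length : Int) - k + 2 ≤ (x.toList.length : Int) := hlen x hx
      rw [PySem.List.slice_toNat x.toList (a := i) (b := i + k) (by omega) (by omega)]
      intro hnil
      have := congrArg List.length hnil
      simp only [List.length_take, List.length_drop, List.length_nil] at this
      omega
  have hstream : dnaC.flatMap (fun s =>
        R.flatMap (fun i => pvNeighbors (PySem.List.slice s (some i) (some (i + k))) d))
      = W.flatMap (fun w => pvNeighbors w d) := by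
    rw [hW, List.flatMap_assoc]
    exact List.flatMap_congr (fun s _ =>
      (List.flatMap_map (fun i => PySem.List.slice s (some i) (some (i + k)))
        (fun w => pvNeighbors w d) R).symm)
  have hAset : dnaC.foldl (fun acc s =>
        R.foldl (fun acc2 i =>
          PySem.Set.union acc2 (pvNeighbors (PySem.List.slice s (some i) (some (i + k))) d)) acc)
        PySem.Set.empty
      = PySem.Set.ofList (W.flatMap (fun w => pvNeighbors w d)) := by
    rw [PySem.List.foldl_congr_mem dnaC
      (fun acc s => R.foldl (fun acc2 i =>
        PySem.Set.union acc2 (pvNeighbors (PySem.List.slice s (some i) (some (i + k))) d)) acc)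
      (fun acc s => PySem.Set.update acc
        (R.flatMap (fun i => pvNeighbors (PySem.List.slice s (some i) (some (i + k))) d)))
      PySem.Set.empty
      (fun acc s _ => pv_foldl_update R _ acc),
      pv_foldl_update dnaC _ PySem.Set.empty, ← hstream]
    rfl
  have hnest : W.foldl
        (fun (st2 : PySem.Dict (List Char) (List (List Char)) × PySem.Set (List Char)) w =>
          if st2.1.contains w then (st2.1, PySem.Set.update st2.2 (st2.1.getD w []))
          else (st2.1.insert w (pvLevelP w d).1, PySem.Set.update st2.2 (pvLevelP w d).1))
        (PySem.Dict.empty, PySem.Set.empty)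
      = dnaC.foldl (fun st s => R.foldl (fun st2 i =>
          let w := PySem.List.slice s (some i) (some (i + k))
          if st2.1.contains w then (st2.1, PySem.Set.update st2.2 (st2.1.getD w []))
          else (st2.1.insert w (pvLevelP w d).1, PySem.Set.update st2.2 (pvLevelP w d).1)) st)
        (PySem.Dict.empty, PySem.Set.empty) := by
    rw [hW, List.foldl_flatMap]
    exact PySem.List.foldl_congr_mem _ _ _ _ (fun st s _ => List.foldl_map)
  have hBset : (dnaC.foldl (fun st s => R.foldl (fun st2 i =>
          let w := PySem.List.slice s (some i) (some (i + k))
          if st2.1.contains w then (st2.1, PySem.Set.update st2.2 (st2.1.getD w []))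
          else (st2.1.insert w (pvLevelP w d).1, PySem.Set.update st2.2 (pvLevelP w d).1)) st)
        (PySem.Dict.empty, PySem.Set.empty)).2
      = PySem.Set.ofList (W.flatMap (fun w => pvNeighbors w d)) := by
    rw [← hnest,
      pv_memo_fold (fun w => (pvLevelP w d).1) W (PySem.Dict.empty, PySem.Set.empty)
        (fun w v hv => by simp [PySem.Dict.get?_empty] at hv),
      PySem.List.foldl_congr_mem W _
        (fun c w => PySem.Set.update c (pvNeighbors w d)) _
        (fun c w hw => by
          rw [pv_levelP_eq w d (hbranch w hw).1 (hbranch w hw).2]),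
      pv_foldl_update W _ PySem.Set.empty]
    rfl
  rw [hAset, hBset,
    show (PySem.Set.empty : PySem.Set (List Char)) = ([] : List (List Char)) from rfl,
    pv_foldl_add_filter (PySem.Set.ofList (W.flatMap (fun w => pvNeighbors w d)))
      (fun nb => dnaC.foldl (fun f s => if ((pvApprox nb s d).length == 0) then false else f) true)
      [] (PySem.Set.nodup_ofList _) (by simp),
    pv_foldl_filter dnaC (fun s c => pvOccurs c s d)
      (PySem.Set.ofList (W.flatMap (fun w => pvNeighbors w d))), List.nil_append]
  refine congrArg (List.map String.ofList) (List.filter_congr (fun nb _ => ?_))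
  have hocc : ∀ s, ((pvApprox nb s d).length == 0) = !(pvOccurs nb s d) := fun s => by
    rw [pv_approx_eq_filter, pv_filter_len_beq_zero]
    show _ = !(PySem.List.pyRange _ _ _).any _
    refine congrArg Bool.not (PySem.List.any_congr_mem (fun j _ => ?_))
    rw [pv_ham_eq_zip_sum]
  rw [PySem.List.foldl_if_false_eq (fun s => ((pvApprox nb s d).length == 0)) dnaC true,
    Bool.true_and,
    PySem.List.any_congr_mem (fun s _ => hocc s) (f := fun s => ((pvApprox nb s d).length == 0)),
    List.not_any_eq_all_not]
  simp only [Bool.not_not]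

-- ===== VERDICT (by name: the statement is the Claim_ definition above) =====
theorem motif_finding_spec : Claim_equal_motif_finding := by
  intro dna k d _ hpre
  exact pv_main_eq dna k d hpre
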